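-- pv_equiv track=rewrite | github.com/V3ndet4/ufc-bot | scripts/build_line_movement_report.py | _history_status
-- ===== SOURCE A (Python) =====
-- def _history_status(panel: dict[str, object]) -> str:
--     has_open = any(str(point.get("kind")) == "open" for line in panel["series"] for point in line)
--     snapshot_count = sum(1 for line in panel["series"] for point in line if str(point.get("kind")) == "snapshot")
--     if has_open and snapshot_count:
--         return f"History: open + {snapshot_count} snapshot{'s' if snapshot_count != 1 else ''} + current"
--     if has_open:
--         return "History: open + current"
--     if snapshot_count:
--         return f"History: first seen + {snapshot_count} snapshot{'s' if snapshot_count != 1 else ''} + current"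
--     return "History: current only, no FanDuel opening history captured yet"
-- ===== SOURCE B (Python) =====
-- def _history_status(panel: dict[str, object]) -> str:
--     has_open = False
--     snapshot_count = 0
--     for line in panel["series"]:
--         for point in line:
--             kind = str(point.get("kind"))
--             if kind == "open":
--                 has_open = True
--             elif kind == "snapshot":
--                 snapshot_count += 1
--     if has_open and snapshot_count:
--         return f"History: open + {snapshot_count} snapshot{'s' if snapshot_count != 1 else ''} + current"
--     if has_open:
--         return "History: open + current"
--     if snapshot_count:
--         return f"History: first seen + {snapshot_count} snapshot{'s' if snapshot_count != 1 else ''} + current"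
--     return "History: current only, no FanDuel opening history captured yet"
-- ===== Notes on version B (the rewrite author's own statement) =====
-- stated objective: simpler
-- what changed: Replaces A's two full traversals (an any-generator and a sum-generator over all points) with one explicit nested loop that computes str(point.get('kind')) once per point and accumulates has_open and snapshot_count together.
import Mathlib
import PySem

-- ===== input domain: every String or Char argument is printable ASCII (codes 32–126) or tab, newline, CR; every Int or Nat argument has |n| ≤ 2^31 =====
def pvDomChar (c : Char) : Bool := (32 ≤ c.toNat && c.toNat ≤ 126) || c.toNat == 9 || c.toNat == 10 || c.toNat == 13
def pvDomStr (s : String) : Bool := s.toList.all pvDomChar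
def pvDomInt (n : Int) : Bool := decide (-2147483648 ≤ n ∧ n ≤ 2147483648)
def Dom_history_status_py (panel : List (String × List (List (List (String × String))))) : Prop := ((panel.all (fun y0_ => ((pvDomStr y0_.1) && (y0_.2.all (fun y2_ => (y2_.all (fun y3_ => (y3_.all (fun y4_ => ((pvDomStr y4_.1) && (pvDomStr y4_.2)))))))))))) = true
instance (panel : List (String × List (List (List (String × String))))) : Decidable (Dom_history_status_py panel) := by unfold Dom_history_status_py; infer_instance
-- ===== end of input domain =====

-- B merges A's two generator traversals into one explicit nested loop computing str(point.get("kind"))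
-- once per point; same four-branch return logic. Return-value equivalence only (neither mutates).

-- str(point.get("kind")): Python's str(None) = "None", str(s) = s
def pvKindStr (point : List (String × String)) : String :=
  match (PySem.Dict.mk point).get? "kind" with
  | none => "None"
  | some s => s

-- the shared four-branch formatting (identical literal code in A and B)
def pvFmt (has_open : Bool) (snapshot_count : Int) : String :=
  if has_open && snapshot_count != 0 then
    "History: open + " ++ PySem.Int.toStr snapshot_count ++ " snapshot" ++
      (if snapshot_count ≠ 1 then "s" else "") ++ " + current"
  else if has_open then
    "History: open + current"
  else if snapshot_count != 0 then
    "History: first seen + " ++ PySem.Int.toStr snapshot_count ++ " snapshot" ++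
      (if snapshot_count ≠ 1 then "s" else "") ++ " + current"
  else
    "History: current only, no FanDuel opening history captured yet"

-- ===== PORT A =====
def history_status_py (panel : List (String × List (List (List (String × String))))) : String :=
  match (PySem.Dict.mk panel).get? "series" with
  | none => ""   -- panel["series"] raises KeyError; excluded by Pre_
  | some series =>
    let has_open : Bool := series.any (fun line => line.any (fun point => pvKindStr point == "open"))
    let snapshot_count : Int :=
      series.foldl (fun n line =>
        line.foldl (fun n point => if pvKindStr point == "snapshot" then n + 1 else n) n) 0
    pvFmt has_open snapshot_count

-- ===== PORT B =====
-- B's per-point step: one computation of kind, both accumulators updated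
def pvStep (st : Bool × Int) (point : List (String × String)) : Bool × Int :=
  let kind := pvKindStr point
  if kind == "open" then (true, st.2)
  else if kind == "snapshot" then (st.1, st.2 + 1)
  else st

def history_status_py_alt (panel : List (String × List (List (List (String × String))))) : String :=
  match (PySem.Dict.mk panel).get? "series" with
  | none => ""   -- KeyError; excluded by Pre_
  | some series =>
    let st : Bool × Int := series.foldl (fun st line => line.foldl pvStep st) (false, 0)
    pvFmt st.1 st.2

-- ===== PRECONDITION & SPEC =====
-- Pre_ excludes only panels without a "series" key, on which A raises KeyError.
def Pre_history_status_py (panel : List (String × List (List (List (String × String))))) : Prop :=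
  ((PySem.Dict.mk panel).get? "series").isSome = true
instance (panel : List (String × List (List (List (String × String))))) : Decidable (Pre_history_status_py panel) := by unfold Pre_history_status_py; infer_instance

def pvWitness_history_status_py : (List (String × List (List (List (String × String))))) :=
  [("series", [[[("kind", "open")], [("kind", "snapshot")]]])]

def Spec_history_status_py (panel : List (String × List (List (List (String × String))))) (out : String) : Prop := out = history_status_py_alt panel
instance (panel : List (String × List (List (List (String × String))))) (out : String) : Decidable (Spec_history_status_py panel out) := by unfold Spec_history_status_py; infer_instance

-- ===== CLAIM (what is proved, stated in full; the proofs are below) =====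
def Claim_equal_history_status_py : Prop := ∀ (panel : List (String × List (List (List (String × String))))), Dom_history_status_py panel → Pre_history_status_py panel → Spec_history_status_py panel (history_status_py panel)

-- ===== LEMMAS AND PROOFS =====

theorem pvStep_eq (st : Bool × Int) (p : List (String × String)) :
    pvStep st p = (st.1 || (pvKindStr p == "open"),
                   if pvKindStr p == "snapshot" then st.2 + 1 else st.2) := by
  unfold pvStep
  by_cases h1 : pvKindStr p = "open"
  · have h2 : pvKindStr p ≠ "snapshot" := by rw [h1]; decide
    simp [h1, h2]
  · by_cases h2 : pvKindStr p = "snapshot" <;> simp [h1, h2, Prod.ext_iff]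

-- B's inner loop over one line, from an arbitrary state
theorem line_loop (line : List (List (String × String))) (b : Bool) (n : Int) :
    line.foldl pvStep (b, n)
    = (b || line.any (fun point => pvKindStr point == "open"),
       line.foldl (fun n point => if pvKindStr point == "snapshot" then n + 1 else n) n) := by
  induction line generalizing b n with
  | nil => simp
  | cons p rest ih =>
    simp only [List.foldl_cons, List.any_cons, pvStep_eq, ih, Bool.or_assoc]

-- B's outer loop
theorem series_loop (series : List (List (List (String × String)))) (b : Bool) (n : Int) :
    series.foldl (fun st line => line.foldl pvStep st) (b, n)
    = (b || series.any (fun line => line.any (fun point => pvKindStr point == "open")),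
       series.foldl (fun n line =>
         line.foldl (fun n point => if pvKindStr point == "snapshot" then n + 1 else n) n) n) := by
  induction series generalizing b n with
  | nil => simp
  | cons line rest ih =>
    simp only [List.foldl_cons, List.any_cons]
    rw [line_loop, ih, Bool.or_assoc]

-- ===== VERDICT (by name: the statement is the Claim_ definition above) =====
theorem history_status_py_spec : Claim_equal_history_status_py := by
  intro panel _ _
  unfold Spec_history_status_py history_status_py history_status_py_alt
  cases (PySem.Dict.mk panel).get? "series" with
  | none => rfl
  | some series =>
    simp only [series_loop, Bool.false_or]
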